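-- pv_equiv track=rewrite | github.com/zhaoleilei-19950226/Knowledge-Graph | data_calculating.py | concept_linkdecisionnum
-- ===== SOURCE A (Python) =====
-- def concept_linkdecisionnum(decisionlist):
--     #定义空的字典
--     outdecisioncount={}
--     #定义空的list存储所有的concept
--     conceptlist=[]
--
--     for i in decisionlist:
--         for j in range(2,len(i),4):
--             if(i[j] not in conceptlist):
--                 conceptlist.append(i[j])
--     #统计每个概念关联的decision
--     for i in conceptlist:
--         count=0
--         for j in decisionlist:
--             if (i in j):
--                 count=count+1
--         outdecisioncount[i]=count
--
--     return outdecisioncount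
-- ===== SOURCE B (Python) =====
-- def concept_linkdecisionnum(decisionlist):
--     # one pass of counting instead of rescanning all decisions per concept
--     conceptlist = list(dict.fromkeys(
--         dec[j] for dec in decisionlist for j in range(2, len(dec), 4)))
--     counts = {}
--     for dec in decisionlist:
--         for v in dict.fromkeys(dec):
--             counts[v] = counts.get(v, 0) + 1
--     return {c: counts.get(c, 0) for c in conceptlist}
-- ===== Notes on version B (the rewrite author's own statement) =====
-- stated objective: faster
-- what changed: Instead of rescanning the whole decisionlist once per concept, B counts each decision's distinct elements into a dict in a single pass and then looks each concept up, dropping O(C*D*L) to O(D*L).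
import Mathlib
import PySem

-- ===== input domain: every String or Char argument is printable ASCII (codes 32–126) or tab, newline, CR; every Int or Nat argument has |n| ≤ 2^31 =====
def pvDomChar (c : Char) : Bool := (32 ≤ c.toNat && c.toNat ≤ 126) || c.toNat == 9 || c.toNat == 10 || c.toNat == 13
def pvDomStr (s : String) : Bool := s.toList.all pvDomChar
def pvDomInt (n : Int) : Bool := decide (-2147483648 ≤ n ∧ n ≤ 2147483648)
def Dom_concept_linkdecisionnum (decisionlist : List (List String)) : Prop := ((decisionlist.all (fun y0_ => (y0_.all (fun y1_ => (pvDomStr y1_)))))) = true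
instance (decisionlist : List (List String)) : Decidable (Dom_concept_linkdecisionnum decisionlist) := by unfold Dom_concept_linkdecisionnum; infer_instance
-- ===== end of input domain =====

-- B replaces A's per-concept rescan of decisionlist by one counting pass over the
-- distinct elements of each decision plus a lookup per concept (faster in a timing run).

-- ===== PORT A =====
def concept_linkdecisionnum (decisionlist : List (List String)) : List (String × Int) :=
  let conceptlist := decisionlist.foldl (fun cl i =>
    (PySem.List.pyRange 2 (i.length : Int) 4).foldl (fun cl j =>
      if PySem.List.pyGetD i j "" ∉ cl then cl ++ [PySem.List.pyGetD i j ""] else cl) cl) []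
  let outdecisioncount := conceptlist.foldl (fun d i =>
    d.insert i (decisionlist.foldl (fun count j => if i ∈ j then count + 1 else count) (0 : Int)))
    PySem.Dict.empty
  outdecisioncount.items

-- ===== PORT B =====
def concept_linkdecisionnum_alt (decisionlist : List (List String)) : List (String × Int) :=
  let conceptlist := PySem.List.dedup (decisionlist.flatMap (fun dec =>
    (PySem.List.pyRange 2 (dec.length : Int) 4).map (fun j => PySem.List.pyGetD dec j "")))
  let counts := decisionlist.foldl (fun d dec =>
    (PySem.List.dedup dec).foldl (fun d v => d.insert v (d.getD v 0 + 1)) d) PySem.Dict.empty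
  conceptlist.map (fun c => (c, counts.getD c 0))

-- ===== PRECONDITION & SPEC =====
def Spec_concept_linkdecisionnum (decisionlist : List (List String)) (out : List (String × Int)) : Prop := out = concept_linkdecisionnum_alt decisionlist
instance (decisionlist : List (List String)) (out : List (String × Int)) : Decidable (Spec_concept_linkdecisionnum decisionlist out) := by unfold Spec_concept_linkdecisionnum; infer_instance

-- ===== CLAIM (what is proved, stated in full; the proofs are below) =====
def Claim_equal_concept_linkdecisionnum : Prop := ∀ (decisionlist : List (List String)), Dom_concept_linkdecisionnum decisionlist → Spec_concept_linkdecisionnum decisionlist (concept_linkdecisionnum decisionlist)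

-- ===== LEMMAS AND PROOFS =====

-- fold over a flatMap = nested fold
theorem pv_foldl_flatMap {α β γ : Type} (g : α → List β) (step : γ → β → γ) :
    ∀ (l : List α) (s : γ),
      (l.flatMap g).foldl step s = l.foldl (fun s x => (g x).foldl step s) s := by
  intro l
  induction l with
  | nil => intro s; rfl
  | cons x xs ih => intro s; simp [List.flatMap_cons, List.foldl_append, ih]

-- A's membership-append step is PySem.Set.add
theorem pv_step_eq_add (cl : List String) (v : String) :
    (if v ∉ cl then cl ++ [v] else cl) = PySem.Set.add cl v := by
  by_cases h : v ∈ cl <;> simp [PySem.Set.add, PySem.Set.contains, h]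

-- conceptlist of A equals dedup of the flattened extraction
theorem pv_concept_eq (dl : List (List String)) :
    dl.foldl (fun cl i =>
      (PySem.List.pyRange 2 (i.length : Int) 4).foldl (fun cl j =>
        if PySem.List.pyGetD i j "" ∉ cl then cl ++ [PySem.List.pyGetD i j ""] else cl) cl) [] =
    PySem.List.dedup (dl.flatMap (fun dec =>
      (PySem.List.pyRange 2 (dec.length : Int) 4).map (fun j => PySem.List.pyGetD dec j ""))) := by
  rw [PySem.List.dedup_eq_ofList, PySem.Set.ofList_eq_foldl,
    pv_foldl_flatMap (step := PySem.Set.add)]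
  have hstep : (fun cl (i : List String) =>
      (PySem.List.pyRange 2 (i.length : Int) 4).foldl (fun cl j =>
        if PySem.List.pyGetD i j "" ∉ cl then cl ++ [PySem.List.pyGetD i j ""] else cl) cl) =
      (fun s i => ((PySem.List.pyRange 2 (i.length : Int) 4).map
        (fun j => PySem.List.pyGetD i j "")).foldl PySem.Set.add s) := by
    funext cl i
    rw [List.foldl_map]
    have : (fun (cl : List String) (j : Int) =>
        if PySem.List.pyGetD i j "" ∉ cl then cl ++ [PySem.List.pyGetD i j ""] else cl) =
        (fun cl j => PySem.Set.add cl (PySem.List.pyGetD i j "")) := by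
      funext cl j; exact pv_step_eq_add cl _
    rw [this]
  rw [hstep]

-- count in a dedup'd list is a membership indicator
theorem pv_count_dedup (dec : List String) (v : String) :
    (PySem.List.dedup dec).count v = if v ∈ dec then 1 else 0 := by
  by_cases h : v ∈ dec
  · rw [if_pos h]
    exact List.count_eq_one_of_mem (PySem.List.nodup_dedup dec)
      ((PySem.List.mem_dedup dec v).2 h)
  · rw [if_neg h]
    exact List.count_eq_zero.2 (fun hm => h ((PySem.List.mem_dedup dec v).1 hm))

-- B's counting pass computes the number of decisions containing v
theorem pv_counts_getD (v : String) :
    ∀ (dl : List (List String)) (d : PySem.Dict String Int),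
      (dl.foldl (fun d dec =>
        (PySem.List.dedup dec).foldl (fun d v => d.insert v (d.getD v 0 + 1)) d) d).getD v 0 =
      d.getD v 0 + (dl.countP (fun dec => v ∈ dec) : Int) := by
  intro dl
  induction dl with
  | nil => intro d; simp
  | cons dec rest ih =>
    intro d
    rw [List.foldl_cons, ih, PySem.Dict.getD_foldl_insert_add_one, pv_count_dedup,
      List.countP_cons]
    by_cases h : v ∈ dec
    · simp [h]; ring
    · simp [h]

-- A's inner counting fold computes the same number
theorem pv_countA (v : String) (dl : List (List String)) :
    dl.foldl (fun count j => if v ∈ j then count + 1 else count) (0 : Int) =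
    (dl.countP (fun dec => v ∈ dec) : Int) := by
  suffices h : ∀ (c : Int), dl.foldl (fun count j => if v ∈ j then count + 1 else count) c =
      c + (dl.countP (fun dec => v ∈ dec) : Int) by
    simpa using h 0
  induction dl with
  | nil => intro c; simp
  | cons dec rest ih =>
    intro c
    rw [List.foldl_cons, List.countP_cons]
    by_cases h : v ∈ dec
    · simp [h, ih]; ring
    · simp [h, ih]

-- getD of a fold of inserts whose value depends only on the key
theorem pv_getD_foldl_insert (f : String → Int) (k : String) :
    ∀ (l : List String) (d : PySem.Dict String Int),
      (l.foldl (fun d i => d.insert i (f i)) d).getD k 0 =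
      if k ∈ l then f k else d.getD k 0 := by
  intro l
  induction l with
  | nil => intro d; simp
  | cons x xs ih =>
    intro d
    rw [List.foldl_cons, ih]
    by_cases hx : k = x <;> by_cases hm : k ∈ xs <;>
      simp [hx, hm, PySem.Dict.getD_insert]

-- a Nodup list is already its own set-of-list
theorem pv_ofList_self : ∀ (l : List String), l.Nodup → PySem.Set.ofList l = l := by
  intro l
  induction l with
  | nil => intro _; rfl
  | cons x xs ih =>
    intro h
    rw [PySem.Set.ofList_cons, ih h.of_cons]
    have hx : x ∉ xs := (List.nodup_cons.1 h).1
    have : PySem.Set.discard xs x = xs := by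
      unfold PySem.Set.discard
      exact List.filter_eq_self.2 (fun y hy => by
        simp
        exact fun he => hx (he ▸ hy))
    rw [this]

-- ===== VERDICT (by name: the statement is the Claim_ definition above) =====
theorem concept_linkdecisionnum_spec : Claim_equal_concept_linkdecisionnum := by
  intro dl _
  unfold Spec_concept_linkdecisionnum concept_linkdecisionnum concept_linkdecisionnum_alt
  dsimp only
  rw [pv_concept_eq dl]
  set L := PySem.List.dedup (dl.flatMap (fun dec =>
    (PySem.List.pyRange 2 (dec.length : Int) 4).map (fun j => PySem.List.pyGetD dec j "")))
    with hL
  have hnd : L.Nodup := by rw [hL, PySem.List.dedup_eq_ofList]; exact PySem.Set.nodup_ofList _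
  have hkeys : (L.foldl (fun d i =>
      d.insert i (dl.foldl (fun count j => if i ∈ j then count + 1 else count) (0 : Int)))
      PySem.Dict.empty).keys = L := by
    rw [PySem.Dict.keys_foldl_insert
      (f := fun _ i => dl.foldl (fun count j => if i ∈ j then count + 1 else count) (0 : Int)),
      PySem.Dict.keys_empty]
    show PySem.Set.update [] L = L
    rw [show PySem.Set.update ([] : List String) L = PySem.Set.ofList L from
      (PySem.Set.ofList_eq_foldl L).symm]
    exact pv_ofList_self L hnd
  rw [PySem.Dict.items_eq_map_keys _ (hkeys.symm ▸ hnd) 0, hkeys]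
  refine List.map_congr_left (fun k hk => ?_)
  rw [pv_getD_foldl_insert, if_pos hk, pv_countA, pv_counts_getD,
    PySem.Dict.getD_empty, zero_add]
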